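-- pv_equiv track=rewrite | github.com/AlloteSoftware/aimath2docx | aimath2docx.py | auto_bracket_dot_power
-- ===== SOURCE A (Python) =====
-- def auto_bracket_dot_power(latex):
--     result = []
--     i = 0
--     n = len(latex)
--     while i < n:
--         # ищем \dot{...}^ или \ddot{...}^
--         if latex.startswith(r'\dot{', i) or latex.startswith(r'\ddot{', i):
--             is_ddot = latex.startswith(r'\ddot{', i)
--             tag = r'\ddot{' if is_ddot else r'\dot{'
--             tag_len = len(tag)
--             result.append('(')  # открывающая скобка
--             result.append(tag)
--             i += tag_len
--             k = 1
--             while i < n: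
--                 c = latex[i]
--                 result.append(c)
--                 if c == '{':
--                     k += 1
--                 elif c == '}':
--                     k -= 1
--                     if k == 0:
--                         i += 1
--                         break
--                 i += 1
--             # после закрывающей }
--             # возможны пробелы
--             while i < n and latex[i].isspace():
--                 result.append(latex[i])
--                 i += 1
--             # если дальше идёт ^
--             if i < n and latex[i] == '^':
--                 result.append(')')
--                 result.append('^')
--                 i += 1
--             else:
--                 # не степень — просто закрываем скобку
--                 result.append(')')
--         else:
--             result.append(latex[i])
--             i += 1
--     return ''.join(result)
-- ===== SOURCE B (Python) =====
-- def _match_brace(s, start):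
--     # returns index just past the matching '}' (brace depth starts at 1), or len(s) if unbalanced
--     depth = 1
--     j = start
--     n = len(s)
--     while j < n:
--         c = s[j]
--         if c == '{':
--             depth += 1
--         elif c == '}':
--             depth -= 1
--             if depth == 0:
--                 return j + 1
--         j += 1
--     return n
--
--
-- def auto_bracket_dot_power(latex):
--     out = []
--     i = 0
--     n = len(latex)
--     while True:
--         p1 = latex.find('\\dot{', i)
--         p2 = latex.find('\\ddot{', i)
--         if p1 == -1 and p2 == -1:
--             out.append(latex[i:])
--             break
--         if p2 != -1 and (p1 == -1 or p2 < p1):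
--             p, tag = p2, '\\ddot{'
--         else:
--             p, tag = p1, '\\dot{'
--         out.append(latex[i:p])
--         j = _match_brace(latex, p + len(tag))
--         group = latex[p + len(tag):j]
--         k = j
--         while k < n and latex[k].isspace():
--             k += 1
--         ws = latex[j:k]
--         if k < n and latex[k] == '^':
--             out.append('(' + tag + group + ws + ')^')
--             i = k + 1
--         else:
--             out.append('(' + tag + group + ws + ')')
--             i = k
--     return ''.join(out)
-- ===== Notes on version B (the rewrite author's own statement) =====
-- stated objective: faster
-- what changed: A appends character by character, testing for a tag prefix at every index and emitting the brace group inside one merged index walk; B instead repeatedly str.find-s the next occurrence of either tag, copies the verbatim slice before it in one piece, and delegates the group to a factored-out brace matcher, emitting group/whitespace/parens as slice concatenations.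
import Mathlib
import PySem

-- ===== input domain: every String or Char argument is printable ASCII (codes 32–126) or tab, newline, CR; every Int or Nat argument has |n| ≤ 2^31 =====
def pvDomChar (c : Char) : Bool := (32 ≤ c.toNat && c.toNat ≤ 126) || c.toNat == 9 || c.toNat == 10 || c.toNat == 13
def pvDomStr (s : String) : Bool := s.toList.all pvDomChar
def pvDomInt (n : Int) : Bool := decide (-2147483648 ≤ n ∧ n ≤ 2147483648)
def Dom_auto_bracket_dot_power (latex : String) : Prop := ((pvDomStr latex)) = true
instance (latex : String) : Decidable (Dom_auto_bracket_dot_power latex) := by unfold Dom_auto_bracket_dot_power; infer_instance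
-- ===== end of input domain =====

-- B replaces A's per-character scan (prefix test at every index, char-by-char emission) by a
-- find-based segment-copy loop with a factored-out brace matcher (measured faster in a timing run).

-- ===== PORT A =====
def pvTagDot : List Char := ['\\', 'd', 'o', 't', '{']
def pvTagDdot : List Char := ['\\', 'd', 'd', 'o', 't', '{']

-- A's inner while-loop: emit chars while counting braces; returns (emitted chars, rest)
def pvAGroup : List Char → Nat → List Char × List Char
  | [], _ => ([], [])
  | c :: rest, k =>
    if c = '{' then
      let pr := pvAGroup rest (k + 1); (c :: pr.1, pr.2)
    else if c = '}' then
      if k = 1 then ([c], rest)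
      else
        let pr := pvAGroup rest (k - 1); (c :: pr.1, pr.2)
    else
      let pr := pvAGroup rest k; (c :: pr.1, pr.2)

lemma pvAGroup_snd_len (cs : List Char) (k : Nat) : (pvAGroup cs k).2.length ≤ cs.length := by
  induction cs generalizing k with
  | nil => simp [pvAGroup]
  | cons c rest ih =>
    simp only [pvAGroup]
    split_ifs <;> simp <;> exact le_trans (ih _) (Nat.le_succ _)

-- A's whitespace while-loop: emit spaces; returns (emitted spaces, rest)
def pvASpaces : List Char → List Char × List Char
  | [] => ([], [])
  | c :: rest =>
    if PySem.Chars.isspace c then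
      let pr := pvASpaces rest; (c :: pr.1, pr.2)
    else ([], c :: rest)

lemma pvASpaces_snd_len (cs : List Char) : (pvASpaces cs).2.length ≤ cs.length := by
  induction cs with
  | nil => simp [pvASpaces]
  | cons c rest ih =>
    simp only [pvASpaces]
    split_ifs <;> simp
    exact le_trans ih (Nat.le_succ _)

lemma pvA_dec (c : Char) (cs : List Char) (t : Nat) (ht : 1 ≤ t) :
    ((pvASpaces (pvAGroup ((c :: cs).drop t) 1).2).2).length < (c :: cs).length := by
  have h1 := pvASpaces_snd_len (pvAGroup ((c :: cs).drop t) 1).2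
  have h2 := pvAGroup_snd_len ((c :: cs).drop t) 1
  simp only [List.length_drop, List.length_cons] at *
  omega

-- A's main while-loop over the remaining suffix
def pvALoop : List Char → List Char
  | [] => []
  | c :: cs =>
    if pvTagDot.isPrefixOf (c :: cs) || pvTagDdot.isPrefixOf (c :: cs) then
      let isDdot := pvTagDdot.isPrefixOf (c :: cs)
      let tag := if isDdot then pvTagDdot else pvTagDot
      let d := pvAGroup ((c :: cs).drop tag.length) 1
      let s := pvASpaces d.2
      if s.2.head? = some '^' then
        '(' :: (tag ++ d.1 ++ s.1 ++ ')' :: '^' :: pvALoop s.2.tail)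
      else
        '(' :: (tag ++ d.1 ++ s.1 ++ ')' :: pvALoop s.2)
    else
      c :: pvALoop cs
  termination_by cs => cs.length
  decreasing_by
  · exact lt_of_le_of_lt (by rw [List.length_tail]; exact Nat.sub_le _ _) (pvA_dec _ _ _ (by split <;> decide))
  · exact pvA_dec _ _ _ (by split <;> decide)
  · simp

def auto_bracket_dot_power (latex : String) : String := String.mk (pvALoop latex.toList)

-- ===== PORT B =====
-- Source B's _match_brace: number of chars consumed (up to and including the matching '}', or all of them)
def pvMatchBrace : List Char → Nat → Nat
  | [], _ => 0
  | c :: rest, depth =>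
    if c = '{' then 1 + pvMatchBrace rest (depth + 1)
    else if c = '}' then
      if depth = 1 then 1 else 1 + pvMatchBrace rest (depth - 1)
    else 1 + pvMatchBrace rest depth

lemma pvB_dec (cs : List Char) (m j : Nat) (hm : 5 ≤ m) (hlen : 5 ≤ cs.length) :
    (((cs.drop m).drop j).dropWhile PySem.Chars.isspace).length < cs.length := by
  have h1 := List.length_dropWhile_le (p := PySem.Chars.isspace) (l := (cs.drop m).drop j)
  simp only [List.length_drop] at *
  omega

-- Source B's main loop, on the remaining suffix: find the next tag, copy the slice before it,
-- take the group / whitespace as slices, then recurse after the group.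
def pvBLoop (cs : List Char) : List Char :=
  let p1 := PySem.Chars.find cs pvTagDot
  let p2 := PySem.Chars.find cs pvTagDdot
  if p1 = -1 ∧ p2 = -1 then cs
  else
    let p : Nat := if p2 ≠ -1 ∧ (p1 = -1 ∨ p2 < p1) then p2.toNat else p1.toNat
    let tag : List Char := if p2 ≠ -1 ∧ (p1 = -1 ∨ p2 < p1) then pvTagDdot else pvTagDot
    let pre := cs.take p
    let after := cs.drop (p + tag.length)
    let j := pvMatchBrace after 1
    let grp := after.take j
    let rest := after.drop j
    let ws := rest.takeWhile PySem.Chars.isspace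
    let rest2 := rest.dropWhile PySem.Chars.isspace
    if rest2.head? = some '^' then
      pre ++ '(' :: tag ++ grp ++ ws ++ [')', '^'] ++ pvBLoop rest2.tail
    else
      pre ++ '(' :: tag ++ grp ++ ws ++ [')'] ++ pvBLoop rest2
  termination_by cs.length
  decreasing_by
  all_goals {
    rename_i hne
    have hlen : (5:Nat) ≤ cs.length := by
      by_cases h2 : PySem.Chars.find cs pvTagDdot = -1
      · have h1 : PySem.Chars.find cs pvTagDot ≠ -1 := by tauto
        have h3 := ((PySem.Chars.find_ne_neg_one_iff (s := cs) (sub := pvTagDot)).1 h1).length_le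
        simp [pvTagDot] at h3; omega
      · have h3 := ((PySem.Chars.find_ne_neg_one_iff (s := cs) (sub := pvTagDdot)).1 h2).length_le
        simp [pvTagDdot] at h3; omega
    first
    | exact lt_of_le_of_lt (by rw [List.length_tail]; exact Nat.sub_le _ _)
        (pvB_dec cs _ _ (by split <;> simp [pvTagDot, pvTagDdot]) hlen)
    | exact pvB_dec cs _ _ (by split <;> simp [pvTagDot, pvTagDdot]) hlen
  }

def auto_bracket_dot_power_alt (latex : String) : String := String.mk (pvBLoop latex.toList)

-- ===== PRECONDITION & SPEC =====
def Spec_auto_bracket_dot_power (latex : String) (out : String) : Prop := out = auto_bracket_dot_power_alt latex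
instance (latex : String) (out : String) : Decidable (Spec_auto_bracket_dot_power latex out) := by unfold Spec_auto_bracket_dot_power; infer_instance

-- ===== CLAIM (what is proved, stated in full; the proofs are below) =====
def Claim_equal_auto_bracket_dot_power : Prop := ∀ (latex : String), Dom_auto_bracket_dot_power latex → Spec_auto_bracket_dot_power latex (auto_bracket_dot_power latex)

-- ===== LEMMAS AND PROOFS =====
lemma pvPrefix_drop_infix (s sub : List Char) (j : Nat) (h : sub <+: s.drop j) : sub <:+: s :=
  (PySem.Chars.isIn_iff_infix sub s).1 ((PySem.Chars.exists_prefix_drop_iff_isIn sub s).1 ⟨j, h⟩)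

lemma pvAGroup_eq (cs : List Char) (k : Nat) :
    pvAGroup cs k = (cs.take (pvMatchBrace cs k), cs.drop (pvMatchBrace cs k)) := by
  induction cs generalizing k with
  | nil => simp [pvAGroup, pvMatchBrace]
  | cons c rest ih =>
    simp only [pvAGroup, pvMatchBrace]
    split_ifs <;> simp [ih, Nat.add_comm 1]

lemma pvASpaces_eq (cs : List Char) :
    pvASpaces cs = (cs.takeWhile PySem.Chars.isspace, cs.dropWhile PySem.Chars.isspace) := by
  induction cs with
  | nil => simp [pvASpaces]
  | cons c rest ih =>
    simp only [pvASpaces, List.takeWhile_cons, List.dropWhile_cons]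
    split_ifs with h <;> simp [ih]

lemma pvNotBoth (l : List Char) : ¬ (pvTagDot <+: l ∧ pvTagDdot <+: l) := by
  rintro ⟨⟨t1, h1⟩, ⟨t2, h2⟩⟩
  rw [← h1] at h2
  simp [pvTagDot, pvTagDdot] at h2

lemma pvALoop_cons_no (c : Char) (cs : List Char)
    (h : (pvTagDot.isPrefixOf (c :: cs) || pvTagDdot.isPrefixOf (c :: cs)) = false) :
    pvALoop (c :: cs) = c :: pvALoop cs := by
  rw [pvALoop]
  simp [h]

lemma pvALoop_skip (p : Nat) (cs : List Char)
    (h : ∀ q, q < p → ¬ pvTagDot <+: cs.drop q ∧ ¬ pvTagDdot <+: cs.drop q) :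
    pvALoop cs = cs.take p ++ pvALoop (cs.drop p) := by
  induction p generalizing cs with
  | zero => simp
  | succ p ih =>
    cases cs with
    | nil => simp
    | cons c rest =>
      have h0 := h 0 (Nat.succ_pos p)
      simp only [List.drop_zero] at h0
      have hb : (pvTagDot.isPrefixOf (c :: rest) || pvTagDdot.isPrefixOf (c :: rest)) = false := by
        rw [Bool.eq_false_iff]
        intro hcon
        rcases Bool.or_eq_true_iff.1 hcon with h1 | h1
        · exact h0.1 (List.isPrefixOf_iff_prefix.1 h1)
        · exact h0.2 (List.isPrefixOf_iff_prefix.1 h1)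
      rw [pvALoop_cons_no c rest hb, ih rest (fun q hq => by simpa using h (q + 1) (by omega))]
      simp

lemma pv_no_prefix_all (cs pat : List Char) (h : PySem.Chars.find cs pat = -1) :
    ∀ q, ¬ pat <+: cs.drop q := fun q hq =>
  (PySem.Chars.find_eq_neg_one_iff cs pat).1 h (pvPrefix_drop_infix cs pat q hq)

lemma pvALoop_nil : pvALoop [] = [] := by rw [pvALoop]

lemma pv_hit_case (n : Nat) (ih : ∀ cs : List Char, cs.length ≤ n → pvALoop cs = pvBLoop cs)
    (cs : List Char) (hcs : cs.length ≤ n + 1) (p : Nat) (tag : List Char)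
    (htag : (tag = pvTagDdot ∧ pvTagDdot <+: cs.drop p) ∨ (tag = pvTagDot ∧ pvTagDot <+: cs.drop p ∧ ¬ pvTagDdot <+: cs.drop p))
    (hskip : ∀ q, q < p → ¬ pvTagDot <+: cs.drop q ∧ ¬ pvTagDdot <+: cs.drop q) :
    pvALoop cs = cs.take p ++ '(' :: (tag
        ++ (cs.drop (p + tag.length)).take (pvMatchBrace (cs.drop (p + tag.length)) 1)
        ++ ((cs.drop (p + tag.length)).drop (pvMatchBrace (cs.drop (p + tag.length)) 1)).takeWhile PySem.Chars.isspace ++ ')' ::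
        (if ((((cs.drop (p + tag.length)).drop (pvMatchBrace (cs.drop (p + tag.length)) 1)).dropWhile PySem.Chars.isspace).head? = some '^') then
          '^' :: pvBLoop ((((cs.drop (p + tag.length)).drop (pvMatchBrace (cs.drop (p + tag.length)) 1)).dropWhile PySem.Chars.isspace).tail)
        else pvBLoop (((cs.drop (p + tag.length)).drop (pvMatchBrace (cs.drop (p + tag.length)) 1)).dropWhile PySem.Chars.isspace))) := by
  rw [pvALoop_skip p cs hskip]
  congr 1
  rw [← List.drop_drop]
  rcases htag with ⟨rfl, hp⟩ | ⟨rfl, hp, hnd⟩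
  · obtain ⟨s, hs⟩ := hp
    rw [← hs]
    have hslen : s.length + 6 ≤ cs.length := by
      have hlc := congrArg List.length hs
      have hdl : (cs.drop p).length = cs.length - p := by simp
      simp [pvTagDdot, hdl] at hlc
      omega
    have hb1 : ∀ j : Nat, ((s.drop j).dropWhile PySem.Chars.isspace).length ≤ n := by
      intro j
      have h1 := List.length_dropWhile_le (p := PySem.Chars.isspace) (l := s.drop j)
      simp only [List.length_drop] at h1
      omega
    have hb2 : ∀ j : Nat, (((s.drop j).dropWhile PySem.Chars.isspace).tail).length ≤ n := by
      intro j
      have h1 := hb1 j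
      have h2 : (((s.drop j).dropWhile PySem.Chars.isspace).tail).length = ((s.drop j).dropWhile PySem.Chars.isspace).length - 1 := List.length_tail
      omega
    have hdd : pvTagDdot.isPrefixOf (pvTagDdot ++ s) = true := by
      simp [List.isPrefixOf_iff_prefix]
    rw [show pvTagDdot ++ s = '\\' :: ('d' :: 'd' :: 'o' :: 't' :: '{' :: s) from rfl]
    rw [pvALoop]
    rw [show ('\\' :: ('d' :: 'd' :: 'o' :: 't' :: '{' :: s)) = pvTagDdot ++ s from rfl]
    simp only [hdd, Bool.or_true, if_true, pvAGroup_eq, pvASpaces_eq]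
    rw [show (pvTagDdot ++ s).drop pvTagDdot.length = s by simp]
    split
    · rw [ih _ (hb2 _)]
    · rw [ih _ (hb1 _)]
  · obtain ⟨s, hs⟩ := hp
    rw [← hs]
    have hslen : s.length + 5 ≤ cs.length := by
      have hlc := congrArg List.length hs
      have hdl : (cs.drop p).length = cs.length - p := by simp
      simp [pvTagDot, hdl] at hlc
      omega
    have hb1 : ∀ j : Nat, ((s.drop j).dropWhile PySem.Chars.isspace).length ≤ n := by
      intro j
      have h1 := List.length_dropWhile_le (p := PySem.Chars.isspace) (l := s.drop j)
      simp only [List.length_drop] at h1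
      omega
    have hb2 : ∀ j : Nat, (((s.drop j).dropWhile PySem.Chars.isspace).tail).length ≤ n := by
      intro j
      have h1 := hb1 j
      have h2 : (((s.drop j).dropWhile PySem.Chars.isspace).tail).length = ((s.drop j).dropWhile PySem.Chars.isspace).length - 1 := List.length_tail
      omega
    have hd : pvTagDot.isPrefixOf (pvTagDot ++ s) = true := by
      simp [List.isPrefixOf_iff_prefix]
    have hdd : pvTagDdot.isPrefixOf (pvTagDot ++ s) = false := by
      rw [Bool.eq_false_iff]
      intro hx
      rw [hs] at hx
      exact hnd (List.isPrefixOf_iff_prefix.1 hx)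
    rw [show pvTagDot ++ s = '\\' :: ('d' :: 'o' :: 't' :: '{' :: s) from rfl]
    rw [pvALoop]
    rw [show ('\\' :: ('d' :: 'o' :: 't' :: '{' :: s)) = pvTagDot ++ s from rfl]
    simp only [hd, hdd, Bool.true_or, if_true, if_false, Bool.false_eq_true, pvAGroup_eq, pvASpaces_eq]
    rw [show (pvTagDot ++ s).drop pvTagDot.length = s by simp]
    split
    · rw [ih _ (hb2 _)]
    · rw [ih _ (hb1 _)]

theorem pv_main_aux : ∀ (n : Nat) (cs : List Char), cs.length ≤ n → pvALoop cs = pvBLoop cs := by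
  intro n
  induction n with
  | zero =>
    intro cs hcs
    have hnil : cs = [] := List.eq_nil_of_length_eq_zero (Nat.le_zero.1 hcs)
    subst hnil
    rw [pvALoop_nil, pvBLoop]
    have h1 : PySem.Chars.find [] pvTagDot = -1 := (PySem.Chars.find_eq_neg_one_iff _ _).2 (by simp [pvTagDot])
    have h2 : PySem.Chars.find [] pvTagDdot = -1 := (PySem.Chars.find_eq_neg_one_iff _ _).2 (by simp [pvTagDdot])
    simp [h1, h2]
  | succ n ih =>
    intro cs hcs
    by_cases hC : PySem.Chars.find cs pvTagDot = -1 ∧ PySem.Chars.find cs pvTagDdot = -1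
    · have hA : pvALoop cs = cs := by
        have e := pvALoop_skip cs.length cs (fun q _ =>
          ⟨pv_no_prefix_all cs pvTagDot hC.1 q, pv_no_prefix_all cs pvTagDdot hC.2 q⟩)
        simpa [pvALoop_nil] using e
      rw [hA, pvBLoop]
      simp [hC.1, hC.2]
    · by_cases hC2 : PySem.Chars.find cs pvTagDdot ≠ -1 ∧
          (PySem.Chars.find cs pvTagDot = -1 ∨ PySem.Chars.find cs pvTagDdot < PySem.Chars.find cs pvTagDot)
      · have h2pos : 0 ≤ PySem.Chars.find cs pvTagDdot := by
          have := PySem.Chars.neg_one_le_find cs pvTagDdot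
          have := hC2.1
          omega
        have spec2 := PySem.Chars.find_spec h2pos
        have hskip : ∀ q, q < (PySem.Chars.find cs pvTagDdot).toNat →
            ¬ pvTagDot <+: cs.drop q ∧ ¬ pvTagDdot <+: cs.drop q := by
          intro q hq
          refine ⟨?_, spec2.2 q hq⟩
          rcases hC2.2 with h1 | h1
          · exact pv_no_prefix_all cs pvTagDot h1 q
          · have h1pos : 0 ≤ PySem.Chars.find cs pvTagDot := by omega
            have spec1 := PySem.Chars.find_spec h1pos
            exact spec1.2 q (by omega)
        rw [pv_hit_case n ih cs hcs (PySem.Chars.find cs pvTagDdot).toNat pvTagDdot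
          (Or.inl ⟨rfl, spec2.1⟩) hskip]
        conv_rhs => rw [pvBLoop]
        rw [if_neg hC]
        simp only [if_pos hC2]
        split <;> simp [List.append_assoc]
      · have h1ne : PySem.Chars.find cs pvTagDot ≠ -1 := by
          intro h1
          have h2ne : PySem.Chars.find cs pvTagDdot ≠ -1 := fun h2 => hC ⟨h1, h2⟩
          exact hC2 ⟨h2ne, Or.inl h1⟩
        have h1pos : 0 ≤ PySem.Chars.find cs pvTagDot := by
          have := PySem.Chars.neg_one_le_find cs pvTagDot
          omega
        have spec1 := PySem.Chars.find_spec h1pos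
        have hd2 : ∀ q, q ≤ (PySem.Chars.find cs pvTagDot).toNat → ¬ pvTagDdot <+: cs.drop q := by
          intro q hq hpre
          have hinf := pvPrefix_drop_infix cs pvTagDdot q hpre
          have h2ne : PySem.Chars.find cs pvTagDdot ≠ -1 := by
            rw [Ne, PySem.Chars.find_eq_neg_one_iff]
            exact fun hn => hn hinf
          have h2pos : 0 ≤ PySem.Chars.find cs pvTagDdot := by
            have := PySem.Chars.neg_one_le_find cs pvTagDdot
            omega
          have spec2 := PySem.Chars.find_spec h2pos
          have hle : (PySem.Chars.find cs pvTagDdot).toNat ≤ q := by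
            by_contra hlt
            exact spec2.2 q (by omega) hpre
          have hf : PySem.Chars.find cs pvTagDot ≤ PySem.Chars.find cs pvTagDdot := by
            by_contra hlt
            exact hC2 ⟨h2ne, Or.inr (by omega)⟩
          have hqp : q = (PySem.Chars.find cs pvTagDot).toNat := by omega
          rw [hqp] at hpre
          exact pvNotBoth (cs.drop (PySem.Chars.find cs pvTagDot).toNat) ⟨spec1.1, hpre⟩
        have hskip : ∀ q, q < (PySem.Chars.find cs pvTagDot).toNat →
            ¬ pvTagDot <+: cs.drop q ∧ ¬ pvTagDdot <+: cs.drop q := fun q hq =>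
          ⟨spec1.2 q hq, hd2 q (Nat.le_of_lt hq)⟩
        rw [pv_hit_case n ih cs hcs (PySem.Chars.find cs pvTagDot).toNat pvTagDot
          (Or.inr ⟨rfl, spec1.1, hd2 _ le_rfl⟩) hskip]
        conv_rhs => rw [pvBLoop]
        rw [if_neg hC]
        simp only [if_neg hC2]
        split <;> simp [List.append_assoc]

theorem pv_main (cs : List Char) : pvALoop cs = pvBLoop cs :=
  pv_main_aux cs.length cs le_rfl

-- ===== VERDICT (by name: the statement is the Claim_ definition above) =====
theorem auto_bracket_dot_power_spec : Claim_equal_auto_bracket_dot_power := by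
  intro latex _
  unfold Spec_auto_bracket_dot_power auto_bracket_dot_power auto_bracket_dot_power_alt
  rw [pv_main]
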